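-- pv_equiv track=rewrite | github.com/kevinlearnscoding/Knitting-Machine-Punchcard-Generator | punchcard-generator.py | apply_double_bed_jacquard_chart
-- ===== SOURCE A (Python) =====
-- def invert_row(row):
--     return "".join("-" if ch == "x" else "x" for ch in row)
--
-- def apply_double_bed_jacquard_chart(rows, start_color="background"):
--     """
--     Convert a standard 2-color chart into DBJ punch selection rows.
--
--     - process rows bottom-up
--     - alternate pair order by parity
--     - emit two rows for each input row
--     - flip stack back to top-down for output
--     """
--     if start_color not in ("background", "foreground"):
--         raise ValueError("DBJ start color must be 'background' or 'foreground'")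
--
--     bottom_up_rows = rows[::-1]
--     final_stack = []
--
--     for i, row in enumerate(bottom_up_rows):
--         row_num = i + 1
--         inverted = invert_row(row)
--         odd_row = row_num % 2 != 0
--
--         if start_color == "background":
--             if odd_row:
--                 final_stack.append(row)
--                 final_stack.append(inverted)
--             else:
--                 final_stack.append(inverted)
--                 final_stack.append(row)
--         else:
--             if odd_row:
--                 final_stack.append(inverted)
--                 final_stack.append(row)
--             else:
--                 final_stack.append(row)
--                 final_stack.append(inverted)
--
--     return final_stack[::-1]
-- ===== SOURCE B (Python) =====
-- def invert_row(row):
--     return "".join("-" if ch == "x" else "x" for ch in row)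
--
-- def apply_double_bed_jacquard_chart(rows, start_color="background"):
--     """Chunk rows two at a time from the top: each 2-row block has one fixed
--     4-row output pattern chosen once up front, so the loop body carries no
--     per-row parity or toggle at all."""
--     if start_color not in ("background", "foreground"):
--         raise ValueError("DBJ start color must be 'background' or 'foreground'")
--
--     swap = (start_color == "background") == (len(rows) % 2 == 1)
--     out = []
--     i = 0
--     while i + 1 < len(rows):
--         a, b = rows[i], rows[i + 1]
--         ia, ib = invert_row(a), invert_row(b)
--         if swap:
--             out += [ia, a, b, ib]
--         else:
--             out += [a, ia, ib, b]
--         i += 2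
--     if i < len(rows):
--         a = rows[i]
--         ia = invert_row(a)
--         out += [ia, a] if swap else [a, ia]
--     return out
-- ===== Notes on version B (the rewrite author's own statement) =====
-- stated objective: alternative
-- what changed: B replaces A's reverse-iterate-reverse loop with per-row parity by a pass that consumes rows two at a time from the top, emitting for each 2-row block one fixed 4-row pattern chosen once up front from len(rows) and start_color, so the loop body carries no parity or toggle at all.
import Mathlib
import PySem

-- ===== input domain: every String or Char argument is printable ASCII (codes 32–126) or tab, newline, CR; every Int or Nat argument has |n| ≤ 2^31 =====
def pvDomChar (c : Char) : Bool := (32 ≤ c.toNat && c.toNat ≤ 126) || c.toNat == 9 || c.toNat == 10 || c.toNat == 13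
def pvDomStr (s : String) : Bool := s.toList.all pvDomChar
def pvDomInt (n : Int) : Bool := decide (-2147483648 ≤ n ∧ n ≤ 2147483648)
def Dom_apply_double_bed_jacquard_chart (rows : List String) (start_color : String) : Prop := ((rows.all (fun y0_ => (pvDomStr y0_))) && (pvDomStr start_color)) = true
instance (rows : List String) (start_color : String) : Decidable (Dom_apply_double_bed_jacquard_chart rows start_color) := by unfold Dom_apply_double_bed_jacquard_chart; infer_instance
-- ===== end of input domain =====

-- B replaces A's reverse-iterate-reverse parity loop with a two-rows-at-a-time
-- pass whose 4-row block pattern is fixed once up front (objective: alternative, same cost).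

-- ===== PORT A =====
-- "".join("-" if ch == "x" else "x" for ch in row): a join of 1-char strings
-- is exactly a character map (exact on all inputs).
def invert_row (row : String) : String :=
  String.mk (row.toList.map (fun ch => if ch == 'x' then '-' else 'x'))

-- the ValueError on other start colors is excluded by Pre_; rows[::-1] is List.reverse
def apply_double_bed_jacquard_chart (rows : List String) (start_color : String) : List String :=
  let bottom_up_rows := rows.reverse
  let final_stack := (PySem.List.enumerate bottom_up_rows).foldl (fun acc p =>
    let row := p.2
    let row_num := p.1 + 1
    let inverted := invert_row row
    let odd_row := PySem.Int.mod row_num 2 != 0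
    if start_color == "background" then
      if odd_row then (acc ++ [row]) ++ [inverted] else (acc ++ [inverted]) ++ [row]
    else
      if odd_row then (acc ++ [inverted]) ++ [row] else (acc ++ [row]) ++ [inverted]) []
  final_stack.reverse

-- ===== PORT B =====
-- Source B's while loop over indices i, i+1 stepping by 2, as the evident
-- two-elements-at-a-time structural recursion over the same list
def pvGoB (swap : Bool) : List String → List String
  | a :: b :: rest =>
      (if swap then [invert_row a, a, b, invert_row b]
       else [a, invert_row a, invert_row b, b]) ++ pvGoB swap rest
  | [a] => if swap then [invert_row a, a] else [a, invert_row a]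
  | [] => []

def apply_double_bed_jacquard_chart_alt (rows : List String) (start_color : String) : List String :=
  let swap := (start_color == "background") == (PySem.Int.mod (rows.length : Int) 2 == 1)
  pvGoB swap rows

-- ===== PRECONDITION & SPEC =====
-- Pre_ excludes exactly the start colors on which Python A raises ValueError.
def Pre_apply_double_bed_jacquard_chart (rows : List String) (start_color : String) : Prop :=
  start_color = "background" ∨ start_color = "foreground"
instance (rows : List String) (start_color : String) : Decidable (Pre_apply_double_bed_jacquard_chart rows start_color) := by unfold Pre_apply_double_bed_jacquard_chart; infer_instance

def pvWitness_apply_double_bed_jacquard_chart : List String × String := (["x-", "-x"], "background")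

def Spec_apply_double_bed_jacquard_chart (rows : List String) (start_color : String) (out : List String) : Prop := out = apply_double_bed_jacquard_chart_alt rows start_color
instance (rows : List String) (start_color : String) (out : List String) : Decidable (Spec_apply_double_bed_jacquard_chart rows start_color out) := by unfold Spec_apply_double_bed_jacquard_chart; infer_instance

-- ===== CLAIM (what is proved, stated in full; the proofs are below) =====
def Claim_equal_apply_double_bed_jacquard_chart : Prop := ∀ (rows : List String) (start_color : String), Dom_apply_double_bed_jacquard_chart rows start_color → Pre_apply_double_bed_jacquard_chart rows start_color → Spec_apply_double_bed_jacquard_chart rows start_color (apply_double_bed_jacquard_chart rows start_color)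

-- ===== LEMMAS AND PROOFS =====

-- the per-row pair emitted by A's loop body, as a pure function
def pairA (sc : String) (p : Int × String) : List String :=
  let row := p.2
  let inv := invert_row row
  if sc == "background" then
    if PySem.Int.mod (p.1 + 1) 2 != 0 then [row, inv] else [inv, row]
  else
    if PySem.Int.mod (p.1 + 1) 2 != 0 then [inv, row] else [row, inv]

-- the pair A contributes at top-down index j (after the final reversal)
def pairOut (n : Int) (sc : String) (p : Int × String) : List String :=
  let row := p.2
  let inv := invert_row row
  let fi := (sc == "background") == (PySem.Int.mod (n - p.1) 2 == 1)
  [if fi then inv else row, if fi then row else inv]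

-- one-row-at-a-time toggling recursion: the common reference form
def go2 (swap : Bool) : List String → List String
  | [] => []
  | r :: rest => (if swap then [invert_row r, r] else [r, invert_row r]) ++ go2 (!swap) rest

theorem A_eq_flatMap (rows : List String) (sc : String) :
    apply_double_bed_jacquard_chart rows sc
      = ((PySem.List.enumerate rows.reverse).flatMap (pairA sc)).reverse := by
  unfold apply_double_bed_jacquard_chart
  have hbody : (fun (acc : List String) (p : Int × String) =>
      let row := p.2
      let row_num := p.1 + 1
      let inverted := invert_row row
      let odd_row := PySem.Int.mod row_num 2 != 0
      if sc == "background" then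
        if odd_row then (acc ++ [row]) ++ [inverted] else (acc ++ [inverted]) ++ [row]
      else
        if odd_row then (acc ++ [inverted]) ++ [row] else (acc ++ [row]) ++ [inverted])
      = fun acc p => acc ++ pairA sc p := by
    funext acc p
    simp only [pairA]
    split_ifs <;> simp
  simp only [hbody, PySem.List.foldl_append_eq_flatMap, List.nil_append]

theorem enum_shift {α : Type} (l : List α) (s t : Int) :
    PySem.List.enumerate l (s + t) = (PySem.List.enumerate l t).map (fun p => (p.1 + s, p.2)) := by
  induction l generalizing t with
  | nil => simp [PySem.List.enumerate_nil]
  | cons x xs ih =>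
    rw [PySem.List.enumerate_cons, PySem.List.enumerate_cons, List.map_cons]
    congr 1
    · simp [Int.add_comm]
    · rw [show s + t + 1 = s + (t + 1) from by ring, ih (t + 1)]

theorem rev_flatMap_enum {α β : Type} (l : List α) (f : Int × α → List β) :
    ((PySem.List.enumerate l.reverse).flatMap f).reverse
      = (PySem.List.enumerate l).flatMap
          (fun p => (f ((l.length : Int) - 1 - p.1, p.2)).reverse) := by
  induction l generalizing f with
  | nil => simp [PySem.List.enumerate_nil]
  | cons x xs ih =>
    have happ : PySem.List.enumerate (xs.reverse ++ [x]) 0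
        = PySem.List.enumerate xs.reverse 0 ++ [((xs.length : Int), x)] := by
      rw [PySem.List.enumerate_append]
      simp [PySem.List.enumerate_cons, PySem.List.enumerate_nil]
    have hshift : PySem.List.enumerate xs 1 = (PySem.List.enumerate xs 0).map (fun p => (p.1 + 1, p.2)) := by
      have := enum_shift xs 1 0
      simpa using this
    calc ((PySem.List.enumerate (x :: xs).reverse).flatMap f).reverse
        = (f ((xs.length : Int), x)).reverse ++ ((PySem.List.enumerate xs.reverse).flatMap f).reverse := by
          simp [happ]
      _ = (f ((xs.length : Int), x)).reverse
            ++ (PySem.List.enumerate xs).flatMap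
                (fun p => (f ((xs.length : Int) - 1 - p.1, p.2)).reverse) := by rw [ih]
      _ = (PySem.List.enumerate (x :: xs)).flatMap
            (fun p => (f (((x :: xs).length : Int) - 1 - p.1, p.2)).reverse) := by
          rw [show PySem.List.enumerate (x :: xs) 0 = (0, x) :: PySem.List.enumerate xs 1 from
            by simp [PySem.List.enumerate_cons]]
          rw [List.flatMap_cons, hshift, List.flatMap_map]
          congr 1
          · congr 1
            simp
          · apply List.flatMap_congr
            intro p _
            congr 2
            simp [Prod.ext_iff]
            push_cast
            ring

theorem pair_point (n : Int) (sc : String) (p : Int × String) :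
    (pairA sc (n - 1 - p.1, p.2)).reverse = pairOut n sc p := by
  unfold pairA pairOut
  have hidx : n - 1 - p.1 + 1 = n - p.1 := by ring
  rw [hidx]
  have h0 : 0 ≤ PySem.Int.mod (n - p.1) 2 := PySem.Int.mod_nonneg _ (by norm_num)
  have h2 : PySem.Int.mod (n - p.1) 2 < 2 := PySem.Int.mod_lt _ (by norm_num)
  interval_cases h : PySem.Int.mod (n - p.1) 2 <;>
    rcases hsc : (sc == "background") <;> simp [h, hsc]

theorem mod_toggle (m : Int) :
    (PySem.Int.mod (m - 1) 2 == 1) = !(PySem.Int.mod m 2 == 1) := by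
  rw [PySem.Int.mod_eq_emod_of_pos (by norm_num : (0:Int) < 2),
      PySem.Int.mod_eq_emod_of_pos (by norm_num : (0:Int) < 2)]
  have h2 : m % 2 = 0 ∨ m % 2 = 1 := by omega
  have h1 : (m - 1) % 2 = 1 - m % 2 := by omega
  rcases h2 with h2 | h2 <;> simp [h1, h2]

theorem go2_cons (s : Bool) (r : String) (rest : List String) :
    go2 s (r :: rest) = (if s then [invert_row r, r] else [r, invert_row r]) ++ go2 (!s) rest := rfl

theorem flatMap_pairOut_eq_go2 (n : Int) (sc : String) (rows : List String) :
    ∀ k : Int, (PySem.List.enumerate rows k).flatMap (pairOut n sc)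
      = go2 ((sc == "background") == (PySem.Int.mod (n - k) 2 == 1)) rows := by
  induction rows with
  | nil => intro k; simp [PySem.List.enumerate_nil, go2]
  | cons r rest ih =>
    intro k
    rw [PySem.List.enumerate_cons, List.flatMap_cons, ih (k + 1)]
    have hmt : (PySem.Int.mod (n - (k + 1)) 2 == 1) = !(PySem.Int.mod (n - k) 2 == 1) := by
      rw [show n - (k + 1) = (n - k) - 1 from by ring, mod_toggle]
    rw [hmt]
    show pairOut n sc (k, r) ++ _ = go2 _ (r :: rest)
    rw [go2_cons]
    rcases hsc : (sc == "background") <;> rcases hm : (PySem.Int.mod (n - k) 2 == 1) <;>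
      simp only [pairOut, hsc, hm] <;> simp

theorem go2_eq_pvGoB : ∀ (swap : Bool) (rows : List String), pvGoB swap rows = go2 swap rows
  | swap, a :: b :: rest => by
    cases swap <;> simp [pvGoB, go2, go2_eq_pvGoB _ rest]
  | swap, [a] => by cases swap <;> simp [pvGoB, go2]
  | _, [] => by simp [pvGoB, go2]

-- ===== VERDICT (by name: the statement is the Claim_ definition above) =====
theorem apply_double_bed_jacquard_chart_spec : Claim_equal_apply_double_bed_jacquard_chart := by
  intro rows sc _ _
  unfold Spec_apply_double_bed_jacquard_chart apply_double_bed_jacquard_chart_alt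
  rw [A_eq_flatMap, rev_flatMap_enum]
  have h1 : (PySem.List.enumerate rows).flatMap
      (fun p => (pairA sc ((rows.length : Int) - 1 - p.1, p.2)).reverse)
      = (PySem.List.enumerate rows).flatMap (pairOut (rows.length : Int) sc) := by
    apply List.flatMap_congr
    intro p _
    exact pair_point _ sc p
  rw [h1, flatMap_pairOut_eq_go2, go2_eq_pvGoB]
  norm_num
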